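-- pv_equiv track=rewrite | github.com/sanekun/KMB_2024_Protocol_maker | pages/2_2️⃣_Protocol_Maker.py | deck_position
-- ===== SOURCE A (Python) =====
-- def deck_position(plates, additional_plate: list):
--     position = [1,2,3,4,5,6,9]
--
--     deck_dict = {}
--     deck_dict["Enzyme_tube"] = position.pop(0)
--     deck_dict["p20_tip"] = position.pop(0)
--     deck_dict["p300_tip"] = position.pop(0)
--
--     for key in plates.keys():
--         # OT-2
--         if plates[key]["type"] == "Destination":
--             deck_dict[key] = 7
--             continue
--         try:
--             deck_dict[key] = position.pop(0)
--         except: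
--             raise "Deck is already Full. Reduce Plates"
--
--     if additional_plate:
--         for key in additional_plate:
--             try:
--                 deck_dict[key] = position.pop(0)
--             except:
--                 raise "Deck is already Full. Reduce Plates"
--
--     return deck_dict
-- ===== SOURCE B (Python) =====
-- def deck_position(plates, additional_plate: list):
--     position = [1, 2, 3, 4, 5, 6, 9]
--     fixed = ["Enzyme_tube", "p20_tip", "p300_tip"]
--     consumers = fixed + [k for k in plates if plates[k]["type"] != "Destination"] + list(additional_plate)
--     if len(consumers) > len(position):
--         raise "Deck is already Full. Reduce Plates"
--     assigned = dict(zip(consumers, position))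
--     deck = {}
--     for k in fixed:
--         deck[k] = assigned[k]
--     for k in plates:
--         deck[k] = 7 if plates[k]["type"] == "Destination" else assigned[k]
--     for k in additional_plate:
--         deck[k] = assigned[k]
--     return deck
-- ===== Notes on version B (the rewrite author's own statement) =====
-- stated objective: alternative
-- what changed: B builds the ordered list of position-consuming keys up front, checks overflow once, bulk-assigns positions with dict(zip(consumers, position)) and then fills the deck in three plain passes, instead of A's single stateful loop that pops positions one at a time inside try/except.
import Mathlib
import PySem

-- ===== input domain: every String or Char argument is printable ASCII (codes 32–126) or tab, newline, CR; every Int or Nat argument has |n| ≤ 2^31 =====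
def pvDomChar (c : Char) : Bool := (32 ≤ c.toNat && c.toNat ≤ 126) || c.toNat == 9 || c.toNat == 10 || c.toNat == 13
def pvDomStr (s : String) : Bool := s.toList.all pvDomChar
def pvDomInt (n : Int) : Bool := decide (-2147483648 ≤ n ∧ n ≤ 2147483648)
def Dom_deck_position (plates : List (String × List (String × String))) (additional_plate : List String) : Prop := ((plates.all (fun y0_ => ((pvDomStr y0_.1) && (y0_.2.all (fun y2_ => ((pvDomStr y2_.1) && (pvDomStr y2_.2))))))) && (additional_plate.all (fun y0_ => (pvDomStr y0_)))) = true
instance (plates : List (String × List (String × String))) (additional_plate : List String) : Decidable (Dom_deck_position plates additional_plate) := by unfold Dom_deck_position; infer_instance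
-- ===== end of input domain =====

-- B replaces A's stateful pop-one-position-per-key loop by "collect the ordered consumer keys,
-- bulk-assign with dict(zip(...)), then fill the deck in three plain passes" (objective: alternative,
-- same cost). Both ports return the dict's items list; equivalence is about the return value.

-- shared helper: plates[key]["type"] == "Destination" (missing "type" = Python KeyError, outside Pre_)
def isDest (pl : List (String × String)) : Bool := (PySem.Dict.mk pl).get? "type" == some "Destination"

-- ===== PORT A =====
-- the 'for key in plates.keys()' loop, threading (deck_dict, position); the pos = [] branch of a
-- non-Destination plate is Python's bare 'raise "…"' (TypeError) — outside Pre_, the port stops there.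
def deckLoopA : List (String × List (String × String)) → PySem.Dict String Int → List Int →
    PySem.Dict String Int × List Int
  | [], deck, pos => (deck, pos)
  | (k, pl) :: rest, deck, pos =>
    if isDest pl then
      deckLoopA rest (deck.insert k 7) pos
    else
      match pos with
      | p :: ps => deckLoopA rest (deck.insert k p) ps
      | [] => (deck, [])          -- Python raises here; outside Pre_

-- the 'for key in additional_plate' loop ('if additional_plate:' only skips the empty loop)
def addLoopA : List String → PySem.Dict String Int → List Int → PySem.Dict String Int
  | [], deck, _ => deck
  | k :: rest, deck, p :: ps => addLoopA rest (deck.insert k p) ps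
  | _ :: _, deck, [] => deck      -- Python raises here; outside Pre_

def deck_position (plates : List (String × List (String × String))) (additional_plate : List String) : List (String × Int) :=
  let position : List Int := [1, 2, 3, 4, 5, 6, 9]
  -- three position.pop(0) assignments
  let deck := ((PySem.Dict.empty.insert "Enzyme_tube" (position.headD 0)).insert
      "p20_tip" (position.tail.headD 0)).insert "p300_tip" (position.tail.tail.headD 0)
  let st := deckLoopA plates deck position.tail.tail.tail
  (addLoopA additional_plate st.1 st.2).items

-- ===== PORT B =====
def deck_position_alt (plates : List (String × List (String × String))) (additional_plate : List String) : List (String × Int) :=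
  let position : List Int := [1, 2, 3, 4, 5, 6, 9]
  let fixed : List String := ["Enzyme_tube", "p20_tip", "p300_tip"]
  let consumers := fixed ++ (plates.filter (fun kv => !(isDest kv.2))).map Prod.fst ++ additional_plate
  if position.length < consumers.length then []        -- Python raises here; outside Pre_
  else
    let assigned := (consumers.zip position).foldl (fun d kp => d.insert kp.1 kp.2) PySem.Dict.empty
    let deck := fixed.foldl (fun d k => d.insert k (assigned.getD k 0)) PySem.Dict.empty
    let deck := plates.foldl (fun d kv =>
      d.insert kv.1 (if isDest kv.2 then (7 : Int) else assigned.getD kv.1 0)) deck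
    let deck := additional_plate.foldl (fun d k => d.insert k (assigned.getD k 0)) deck
    deck.items

-- ===== PRECONDITION & SPEC =====
-- Pre_ = exactly where A returns: every plate has a "type" entry (else KeyError), and the three fixed
-- names + non-Destination plates + additional plates fit on the 7 deck positions (else A raises).
def Pre_deck_position (plates : List (String × List (String × String))) (additional_plate : List String) : Prop :=
  (∀ kv ∈ plates, ((PySem.Dict.mk kv.2).get? "type").isSome) ∧
  (plates.filter (fun kv => !(isDest kv.2))).length + additional_plate.length ≤ 4
instance (plates : List (String × List (String × String))) (additional_plate : List String) : Decidable (Pre_deck_position plates additional_plate) := by unfold Pre_deck_position; infer_instance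

def pvWitness_deck_position : (List (String × List (String × String))) × List String :=
  ([("PCR_plate", [("type", "Source")]), ("dest1", [("type", "Destination")])], ["extra_plate"])

def Spec_deck_position (plates : List (String × List (String × String))) (additional_plate : List String) (out : List (String × Int)) : Prop := out = deck_position_alt plates additional_plate
instance (plates : List (String × List (String × String))) (additional_plate : List String) (out : List (String × Int)) : Decidable (Spec_deck_position plates additional_plate out) := by unfold Spec_deck_position; infer_instance

-- ===== CLAIM (what is proved, stated in full; the proofs are below) =====
def Claim_equal_deck_position : Prop := ∀ (plates : List (String × List (String × String))) (additional_plate : List String), Dom_deck_position plates additional_plate → Pre_deck_position plates additional_plate → Spec_deck_position plates additional_plate (deck_position plates additional_plate)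

-- ===== LEMMAS AND PROOFS =====

-- value of the LAST pair with first component k (the value a dict built from L by inserts gives k)
def lastVal : List (String × Int) → String → Option Int
  | [], _ => none
  | (k', v) :: t, k => (lastVal t k).or (if k = k' then some v else none)

theorem lastVal_append (X Y : List (String × Int)) (k : String) :
    lastVal (X ++ Y) k = (lastVal Y k).or (lastVal X k) := by
  induction X with
  | nil => simp [lastVal]
  | cons p t ih => cases p; simp [lastVal, ih, Option.or_assoc]

theorem lastVal_eq_none_iff (L : List (String × Int)) (k : String) :
    lastVal L k = none ↔ k ∉ L.map Prod.fst := by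
  induction L with
  | nil => simp [lastVal]
  | cons p t ih =>
    cases p with
    | mk k' v =>
      simp only [lastVal, Option.or_eq_none_iff, ih, List.map_cons, List.mem_cons]
      constructor
      · rintro ⟨h1, h2⟩ (h | h)
        · subst h; simp at h2
        · exact h1 h
      · intro h
        refine ⟨fun hm => h (Or.inr hm), ?_⟩
        have : ¬ k = k' := fun hk => h (Or.inl hk)
        simp [this]

-- non-Destination keys of a plates list, in order
def ndk (r : List (String × List (String × String))) : List String :=
  (r.filter (fun kv => !(isDest kv.2))).map Prod.fst

-- A's plate loop as a pure pair list: key ↦ 7 for Destination, else the next position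
def specA : List (String × List (String × String)) → List Int → List (String × Int)
  | [], _ => []
  | (k, pl) :: rest, pos =>
    if isDest pl then (k, 7) :: specA rest pos
    else match pos with
      | p :: ps => (k, p) :: specA rest ps
      | [] => []

def ins (d : PySem.Dict String Int) (kp : String × Int) : PySem.Dict String Int := d.insert kp.1 kp.2

theorem deckLoopA_eq (r : List (String × List (String × String))) :
    ∀ (d : PySem.Dict String Int) (pos : List Int),
    (r.filter (fun kv => !(isDest kv.2))).length ≤ pos.length →
    deckLoopA r d pos = ((specA r pos).foldl ins d,
      pos.drop (r.filter (fun kv => !(isDest kv.2))).length) := by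
  induction r with
  | nil => intro d pos _; simp [deckLoopA, specA]
  | cons p rest ih =>
    intro d pos hlen
    cases p with
    | mk k pl =>
      by_cases hd : isDest pl = true
      · simpa [deckLoopA, specA, hd, List.filter_cons, ins] using
          ih (d.insert k 7) pos (by simpa [List.filter_cons, hd] using hlen)
      · have hd' : isDest pl = false := by simpa using hd
        cases pos with
        | nil => simp [List.filter_cons, hd'] at hlen
        | cons p0 ps =>
          simpa [deckLoopA, specA, hd', List.filter_cons, ins] using
            ih (d.insert k p0) ps (by simpa [List.filter_cons, hd'] using hlen)

theorem addLoopA_eq (ks : List String) :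
    ∀ (d : PySem.Dict String Int) (pos : List Int), ks.length ≤ pos.length →
    addLoopA ks d pos = (ks.zip pos).foldl ins d := by
  induction ks with
  | nil => intro d pos _; simp [addLoopA]
  | cons k rest ih =>
    intro d pos hlen
    cases pos with
    | nil => simp at hlen
    | cons p ps =>
      simpa [addLoopA, ins] using ih (d.insert k p) ps (by simpa using hlen)

theorem get?_foldl_ins (L : List (String × Int)) :
    ∀ (d : PySem.Dict String Int) (k : String),
    (L.foldl ins d).get? k = (lastVal L k).or (d.get? k) := by
  induction L with
  | nil => intro d k; simp [lastVal]
  | cons p t ih =>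
    intro d k
    cases p with
    | mk k0 v0 =>
      have : (((k0, v0) :: t).foldl ins d) = t.foldl ins (d.insert k0 v0) := rfl
      rw [this, ih, lastVal, Option.or_assoc]
      congr 1
      by_cases hk : k = k0 <;> simp [hk, PySem.Dict.get?_insert]

-- two insert-folds from empty over pair lists with the same key sequence and the same last value
-- per key build the same dict
theorem foldl_ins_ext (L1 L2 : List (String × Int))
    (hk : L1.map Prod.fst = L2.map Prod.fst)
    (hl : ∀ k, lastVal L1 k = lastVal L2 k) :
    L1.foldl ins PySem.Dict.empty = L2.foldl ins PySem.Dict.empty := by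
  have hins : ∀ (L : List (String × Int)), L.foldl ins PySem.Dict.empty
      = L.foldl (fun d (kp : String × Int) => d.insert kp.1 kp.2) PySem.Dict.empty := fun _ => rfl
  have hkeys : ∀ (L : List (String × Int)),
      (L.foldl ins PySem.Dict.empty).keys = PySem.Set.update (PySem.Dict.empty : PySem.Dict String Int).keys (L.map Prod.fst) := by
    intro L; rw [hins]
    exact PySem.Dict.keys_foldl_insert_key L Prod.fst (fun d kp => kp.2) PySem.Dict.empty
  have hnd : ∀ (L : List (String × Int)), (L.foldl ins PySem.Dict.empty).keys.Nodup := by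
    intro L; rw [hins]
    exact PySem.Dict.nodup_keys_foldl_insert_key L Prod.fst (fun d kp => kp.2) PySem.Dict.empty
      (by simp [PySem.Dict.keys_empty])
  have hkeq : (L1.foldl ins PySem.Dict.empty).keys = (L2.foldl ins PySem.Dict.empty).keys := by
    rw [hkeys, hkeys, hk]
  have hget : ∀ k, (L1.foldl ins PySem.Dict.empty).get? k = (L2.foldl ins PySem.Dict.empty).get? k := by
    intro k; rw [get?_foldl_ins, get?_foldl_ins, hl]
  apply PySem.Dict.ext
  rw [PySem.Dict.items_eq_map_keys _ (hnd L1) 0, PySem.Dict.items_eq_map_keys _ (hnd L2) 0, hkeq]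
  apply List.map_congr_left
  intro k _
  simp [PySem.Dict.getD_eq_get?_getD, hget k]

theorem map_fst_specA (r : List (String × List (String × String))) :
    ∀ pos : List Int, (r.filter (fun kv => !(isDest kv.2))).length ≤ pos.length →
    (specA r pos).map Prod.fst = r.map Prod.fst := by
  induction r with
  | nil => intro pos _; simp [specA]
  | cons p rest ih =>
    intro pos hlen
    cases p with
    | mk k pl =>
      by_cases hd : isDest pl = true
      · simp only [specA, hd, if_true, List.map_cons]
        rw [ih pos (by simpa [List.filter_cons, hd] using hlen)]
      · have hd' : isDest pl = false := by simpa using hd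
        cases pos with
        | nil => simp [List.filter_cons, hd'] at hlen
        | cons p0 ps =>
          simp only [specA, hd', Bool.false_eq_true, if_false, List.map_cons]
          rw [ih ps (by simpa [List.filter_cons, hd'] using hlen)]

theorem lastVal_map_self (ks : List String) (g : String → Int) (k : String) :
    lastVal (ks.map (fun x => (x, g x))) k = if k ∈ ks then some (g k) else none := by
  induction ks with
  | nil => simp [lastVal]
  | cons a t ih =>
    simp only [List.map_cons, lastVal, ih, List.mem_cons]
    by_cases hk : k = a
    · subst hk; by_cases hm : k ∈ t <;> simp [hm]
    · by_cases hm : k ∈ t <;> simp [hm, hk]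

theorem lastVal_zip_isSome (ks : List String) (pos : List Int) (k : String)
    (hm : k ∈ ks) (hlen : ks.length ≤ pos.length) :
    lastVal (ks.zip pos) k ≠ none := by
  intro hc
  rw [lastVal_eq_none_iff, List.map_fst_zip hlen] at hc
  exact hc hm

theorem lastVal_zip_none (ks : List String) (pos : List Int) (k : String)
    (hm : k ∉ ks) : lastVal (ks.zip pos) k = none := by
  rw [lastVal_eq_none_iff]
  intro hc
  rcases List.exists_of_mem_map hc with ⟨p, hp, he⟩
  exact hm (he ▸ (List.of_mem_zip hp).1)

-- A's plate-loop pairs and B's plate-pass pairs give every key the same last value, provided g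
-- agrees with the zip of non-Destination keys against the positions wherever that zip defines k
theorem specA_vs_map (g : String → Int) (k : String) :
    ∀ (r : List (String × List (String × String))) (pos : List Int),
    (r.filter (fun kv => !(isDest kv.2))).length ≤ pos.length →
    (lastVal ((ndk r).zip pos) k ≠ none → lastVal ((ndk r).zip pos) k = some (g k)) →
    lastVal (specA r pos) k
      = lastVal (r.map (fun kv => (kv.1, if isDest kv.2 then (7 : Int) else g kv.1))) k := by
  intro r
  induction r with
  | nil => intro pos _ _; simp [specA, lastVal]
  | cons p rest ih =>
    intro pos hlen hg
    cases p with
    | mk k0 pl =>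
      by_cases hd : isDest pl = true
      · have hnd : ndk ((k0, pl) :: rest) = ndk rest := by
          simp [ndk, List.filter_cons, hd]
        simp only [specA, hd, if_true, List.map_cons, lastVal]
        rw [ih pos (by simpa [List.filter_cons, hd] using hlen) (by rw [← hnd]; exact hg)]
      · have hd' : isDest pl = false := by simpa using hd
        cases pos with
        | nil => simp [List.filter_cons, hd'] at hlen
        | cons p0 ps =>
          have hndcons : ndk ((k0, pl) :: rest) = k0 :: ndk rest := by
            simp [ndk, List.filter_cons, hd']
          have hzcons : (ndk ((k0, pl) :: rest)).zip (p0 :: ps) = (k0, p0) :: (ndk rest).zip ps := by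
            rw [hndcons]; rfl
          have hlen' : (rest.filter (fun kv => !(isDest kv.2))).length ≤ ps.length := by
            simpa [List.filter_cons, hd'] using hlen
          have hg' : lastVal ((ndk rest).zip ps) k ≠ none →
              lastVal ((ndk rest).zip ps) k = some (g k) := by
            intro hs
            have := hg (by rw [hzcons]; simp [lastVal]; intro hnone; exact absurd hnone hs)
            rw [hzcons] at this
            simp only [lastVal] at this
            rcases ho : lastVal ((ndk rest).zip ps) k with _ | v
            · exact absurd ho hs
            · rw [ho] at this; simpa using this
          simp only [specA, hd', Bool.false_eq_true, if_false, List.map_cons, lastVal]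
          rw [ih ps hlen' hg']
          rcases ho : lastVal (rest.map (fun kv => (kv.1, if isDest kv.2 then (7 : Int) else g kv.1))) k with _ | v
          · -- tail has no k: the head pair decides; p0 = g k0 when k = k0
            by_cases hk : k = k0
            · subst hk
              have hknot : k ∉ rest.map Prod.fst := by
                rw [lastVal_eq_none_iff] at ho
                simpa using ho
              have hzk : lastVal ((ndk rest).zip ps) k = none := by
                apply lastVal_zip_none
                intro hc
                exact hknot (by
                  rcases List.exists_of_mem_map (by simpa [ndk] using hc : k ∈ (rest.filter (fun kv => !(isDest kv.2))).map Prod.fst) with ⟨q, hq, he⟩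
                  exact he ▸ List.mem_map_of_mem (List.mem_of_mem_filter hq))
              have := hg (by rw [hzcons]; simp [lastVal, hzk])
              rw [hzcons] at this
              simp [lastVal, hzk] at this
              simp [this, hd']
            · simp [hk]
          · simp [ho]

-- split (xs ++ ys).zip zs at xs.length
theorem zip_append_split (xs ys : List String) : ∀ (zs : List Int),
    (xs ++ ys).zip zs = xs.zip zs ++ ys.zip (zs.drop xs.length) := by
  induction xs with
  | nil => intro zs; simp
  | cons a t ih =>
    intro zs
    cases zs with
    | nil => simp
    | cons z zt => simp [List.zip_cons_cons, ih zt]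

theorem deck_position_eq_foldl (plates : List (String × List (String × String))) (additional_plate : List String)
    (hm4 : (plates.filter (fun kv => !(isDest kv.2))).length ≤ 4)
    (hadd : additional_plate.length + (plates.filter (fun kv => !(isDest kv.2))).length ≤ 4) :
    deck_position plates additional_plate =
      (List.foldl ins PySem.Dict.empty
        ([("Enzyme_tube", (1:Int)), ("p20_tip", 2), ("p300_tip", 3)]
          ++ specA plates [4, 5, 6, 9]
          ++ additional_plate.zip (([4, 5, 6, 9] : List Int).drop
              (plates.filter (fun kv => !(isDest kv.2))).length))).items := by
  have hdrop : (([4, 5, 6, 9] : List Int).drop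
      (plates.filter (fun kv => !(isDest kv.2))).length).length
      = 4 - (plates.filter (fun kv => !(isDest kv.2))).length := by
    simp [List.length_drop]
  simp only [deck_position, List.headD_cons, List.tail_cons]
  rw [deckLoopA_eq plates _ _ (by simpa using hm4)]
  rw [addLoopA_eq _ _ _ (by rw [hdrop]; omega)]
  rw [List.foldl_append, List.foldl_append]
  rfl

def gfun (plates : List (String × List (String × String))) (additional_plate : List String) : String → Int :=
  fun k => (((["Enzyme_tube", "p20_tip", "p300_tip"] ++ ndk plates ++ additional_plate).zip
      ([1, 2, 3, 4, 5, 6, 9] : List Int)).foldl ins PySem.Dict.empty).getD k 0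

theorem deck_position_alt_eq_foldl (plates : List (String × List (String × String))) (additional_plate : List String)
    (hcount : (plates.filter (fun kv => !(isDest kv.2))).length + additional_plate.length ≤ 4) :
    deck_position_alt plates additional_plate =
      (List.foldl ins PySem.Dict.empty
        ((["Enzyme_tube", "p20_tip", "p300_tip"] : List String).map
            (fun k => (k, gfun plates additional_plate k))
          ++ plates.map (fun kv => (kv.1,
              if isDest kv.2 then (7 : Int) else gfun plates additional_plate kv.1))
          ++ additional_plate.map (fun k => (k, gfun plates additional_plate k)))).items := by
  simp only [deck_position_alt]
  rw [if_neg (by simp [List.length_append, List.length_map]; omega)]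
  simp only [List.foldl_append, List.foldl_map]
  rfl

theorem drop_shift (n : Nat) (hn : n ≤ 4) :
    List.drop (n + 3) ([1, 2, 3, 4, 5, 6, 9] : List Int)
      = List.drop n ([4, 5, 6, 9] : List Int) := by
  interval_cases n <;> rfl

-- every key gets the same final value from A's interleaved pair list and B's three-pass pair list
theorem lastVal_LA_eq_LB (plates : List (String × List (String × String))) (additional_plate : List String)
    (hcount : (plates.filter (fun kv => !(isDest kv.2))).length + additional_plate.length ≤ 4)
    (k : String) :
    lastVal ([("Enzyme_tube", (1:Int)), ("p20_tip", 2), ("p300_tip", 3)]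
        ++ specA plates [4, 5, 6, 9]
        ++ additional_plate.zip (([4, 5, 6, 9] : List Int).drop
            (plates.filter (fun kv => !(isDest kv.2))).length)) k
    = lastVal ((["Enzyme_tube", "p20_tip", "p300_tip"] : List String).map
            (fun k => (k, gfun plates additional_plate k))
        ++ plates.map (fun kv => (kv.1,
            if isDest kv.2 then (7 : Int) else gfun plates additional_plate kv.1))
        ++ additional_plate.map (fun k => (k, gfun plates additional_plate k))) k := by
  set g := gfun plates additional_plate with hgdef
  set m := (plates.filter (fun kv => !(isDest kv.2))).length with hmdef
  have hm4 : m ≤ 4 := by omega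
  have hml : (ndk plates).length = m := by simp [ndk, hmdef]
  have hdroplen : ((([4, 5, 6, 9] : List Int)).drop m).length = 4 - m := by
    simp [List.length_drop]
  -- split the zip of consumers against positions into the three segments
  have hz : ((["Enzyme_tube", "p20_tip", "p300_tip"] ++ ndk plates ++ additional_plate).zip
        ([1, 2, 3, 4, 5, 6, 9] : List Int))
      = [("Enzyme_tube", (1:Int)), ("p20_tip", 2), ("p300_tip", 3)]
        ++ (ndk plates).zip ([4, 5, 6, 9] : List Int)
        ++ additional_plate.zip (([4, 5, 6, 9] : List Int).drop m) := by
    rw [zip_append_split, zip_append_split]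
    have h1 : (["Enzyme_tube", "p20_tip", "p300_tip"] : List String).zip
        ([1, 2, 3, 4, 5, 6, 9] : List Int)
        = [("Enzyme_tube", (1:Int)), ("p20_tip", 2), ("p300_tip", 3)] := rfl
    have h2 : (([1, 2, 3, 4, 5, 6, 9] : List Int)).drop
        (["Enzyme_tube", "p20_tip", "p300_tip"] ++ ndk plates).length
        = (([4, 5, 6, 9] : List Int)).drop m := by
      have hlen3 : (["Enzyme_tube", "p20_tip", "p300_tip"] ++ ndk plates).length = m + 3 := by
        simp only [List.length_append, List.length_cons, List.length_nil, hml]; omega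
      rw [hlen3, drop_shift m hm4]
    rw [h1, h2]
    rfl
  -- gfun k reads the last value of k in that zip
  have hglast : ∀ j, (lastVal
      ([("Enzyme_tube", (1:Int)), ("p20_tip", 2), ("p300_tip", 3)]
        ++ (ndk plates).zip ([4, 5, 6, 9] : List Int)
        ++ additional_plate.zip (([4, 5, 6, 9] : List Int).drop m)) j).getD 0 = g j := by
    intro j
    rw [hgdef]
    simp only [gfun, ← hmdef, ← hz]
    rw [PySem.Dict.getD_eq_get?_getD, get?_foldl_ins]
    simp [PySem.Dict.get?_empty]
  rw [lastVal_append, lastVal_append, lastVal_append, lastVal_append]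
  by_cases hka : k ∈ additional_plate
  · -- last write comes from the additional_plate pass in both programs
    have hQA : lastVal (additional_plate.zip ((([4, 5, 6, 9] : List Int)).drop m)) k ≠ none :=
      lastVal_zip_isSome additional_plate _ k hka (by rw [hdroplen]; omega)
    obtain ⟨v, hv⟩ := Option.ne_none_iff_exists'.mp hQA
    have hgv : g k = v := by
      rw [← hglast k, lastVal_append, lastVal_append, hv]; rfl
    rw [hv, lastVal_map_self, if_pos hka, hgv]
    rfl
  · have hQA : lastVal (additional_plate.zip ((([4, 5, 6, 9] : List Int)).drop m)) k = none :=
      lastVal_zip_none additional_plate _ k hka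
    have hQB : lastVal (additional_plate.map (fun x => (x, g x))) k = none := by
      rw [lastVal_map_self, if_neg hka]
    rw [hQA, hQB, Option.none_or, Option.none_or]
    have hndk_sub : k ∈ ndk plates → k ∈ plates.map Prod.fst := by
      intro hc
      rcases List.exists_of_mem_map (by simpa [ndk] using hc :
        k ∈ (plates.filter (fun kv => !(isDest kv.2))).map Prod.fst) with ⟨q, hq, he⟩
      exact he ▸ List.mem_map_of_mem (List.mem_of_mem_filter hq)
    by_cases hkp : k ∈ plates.map Prod.fst
    · -- last write comes from the plates pass in both programs
      have Hgk : lastVal ((ndk plates).zip ([4, 5, 6, 9] : List Int)) k ≠ none →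
          lastVal ((ndk plates).zip ([4, 5, 6, 9] : List Int)) k = some (g k) := by
        intro hs
        obtain ⟨v, hv⟩ := Option.ne_none_iff_exists'.mp hs
        have : g k = v := by
          rw [← hglast k, lastVal_append, lastVal_append, hQA, hv]; rfl
        rw [hv, this]
      have hPAB := specA_vs_map g k plates ([4, 5, 6, 9] : List Int) (by simpa using hm4) Hgk
      have hPA : lastVal (specA plates ([4, 5, 6, 9] : List Int)) k ≠ none := by
        rw [Ne, lastVal_eq_none_iff, map_fst_specA plates _ (by simpa using hm4)]
        simpa using hkp
      obtain ⟨v, hv⟩ := Option.ne_none_iff_exists'.mp hPA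
      rw [hv, ← hPAB, hv]
      rfl
    · -- untouched by both later passes: decided by the fixed-name segment
      have hPA : lastVal (specA plates ([4, 5, 6, 9] : List Int)) k = none := by
        rw [lastVal_eq_none_iff, map_fst_specA plates _ (by simpa using hm4)]
        simpa using hkp
      have hPB : lastVal (plates.map (fun kv => (kv.1,
          if isDest kv.2 then (7 : Int) else g kv.1))) k = none := by
        rw [lastVal_eq_none_iff]
        simpa using hkp
      have hZp : lastVal ((ndk plates).zip ([4, 5, 6, 9] : List Int)) k = none :=
        lastVal_zip_none _ _ _ (fun hc => hkp (hndk_sub hc))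
      rw [hPA, hPB, Option.none_or, Option.none_or]
      by_cases hkf : k ∈ (["Enzyme_tube", "p20_tip", "p300_tip"] : List String)
      · have hF : lastVal ([("Enzyme_tube", (1:Int)), ("p20_tip", 2), ("p300_tip", 3)]) k ≠ none := by
          exact lastVal_zip_isSome (["Enzyme_tube", "p20_tip", "p300_tip"] : List String)
            ([1, 2, 3, 4, 5, 6, 9] : List Int) k hkf (by decide)
        obtain ⟨v, hv⟩ := Option.ne_none_iff_exists'.mp hF
        have hgv : g k = v := by
          rw [← hglast k, lastVal_append, lastVal_append, hQA, hZp, hv]; rfl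
        rw [hv, lastVal_map_self, if_pos hkf, hgv]
      · have hF : lastVal ([("Enzyme_tube", (1:Int)), ("p20_tip", 2), ("p300_tip", 3)]) k = none :=
          lastVal_zip_none (["Enzyme_tube", "p20_tip", "p300_tip"] : List String)
            ([1, 2, 3, 4, 5, 6, 9] : List Int) k hkf
        rw [hF, lastVal_map_self, if_neg hkf]

theorem deck_position_spec : Claim_equal_deck_position := by
  intro plates additional_plate _hdom hpre
  obtain ⟨_htype, hcount⟩ := hpre
  show deck_position plates additional_plate = deck_position_alt plates additional_plate
  have h4 : (plates.filter (fun kv => !(isDest kv.2))).length ≤ 4 := by omega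
  have h4' : additional_plate.length + (plates.filter (fun kv => !(isDest kv.2))).length ≤ 4 := by
    omega
  have hz4 : additional_plate.length ≤ (([4, 5, 6, 9] : List Int).drop
      (plates.filter (fun kv => !(isDest kv.2))).length).length := by
    rw [List.length_drop]; simp; omega
  rw [deck_position_eq_foldl plates additional_plate h4 h4',
    deck_position_alt_eq_foldl plates additional_plate hcount]
  apply congrArg PySem.Dict.items
  apply foldl_ins_ext
  · rw [List.map_append, List.map_append, List.map_append, List.map_append,
      map_fst_specA plates ([4, 5, 6, 9] : List Int) (by simpa using h4),
      List.map_fst_zip hz4]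
    simp [Function.comp_def]
  · intro k
    exact lastVal_LA_eq_LB plates additional_plate hcount k
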